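-- pv_equiv track=rewrite | github.com/jamespfennell/transiter | transiter/services/servicemap/servicemapmanager.py | calculate_changed_route_pks_from_hashes
-- ===== SOURCE A (Python) =====
-- def calculate_changed_route_pks_from_hashes(
--     route_pk_to_previous_hash, route_pk_to_new_hash
-- ):
--     all_route_pks = set(route_pk_to_new_hash.keys()).union(
--         route_pk_to_previous_hash.keys()
--     )
--     changed_route_pks = set()
--     for route_pk in all_route_pks:
--         previous_hash = route_pk_to_previous_hash.get(route_pk, None)
--         new_hash = route_pk_to_new_hash.get(route_pk, None)
--         if previous_hash is not None and new_hash is not None: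
--             if previous_hash == new_hash:
--                 continue
--         changed_route_pks.add(route_pk)
--     return changed_route_pks
-- ===== SOURCE B (Python) =====
-- def calculate_changed_route_pks_from_hashes(
--     route_pk_to_previous_hash, route_pk_to_new_hash
-- ):
--     # A pk is unchanged iff the same non-None (pk, hash) pair occurs in both
--     # dicts' item sets: intersect the item sets, no per-key value lookups.
--     previous_items = {
--         item for item in route_pk_to_previous_hash.items() if item[1] is not None
--     }
--     new_items = {
--         item for item in route_pk_to_new_hash.items() if item[1] is not None
--     }
--     unchanged_route_pks = {pk for pk, _ in new_items & previous_items}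
--     all_route_pks = set(route_pk_to_new_hash) | set(route_pk_to_previous_hash)
--     return all_route_pks - unchanged_route_pks
-- ===== Notes on version B (the rewrite author's own statement) =====
-- stated objective: alternative
-- what changed: Instead of looping over the key union and looking up and comparing both hashes per key, B intersects the two dicts' (pk, hash) item sets to obtain the unchanged pks directly and subtracts them from the key union; no per-key value lookup or comparison occurs.
import Mathlib
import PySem

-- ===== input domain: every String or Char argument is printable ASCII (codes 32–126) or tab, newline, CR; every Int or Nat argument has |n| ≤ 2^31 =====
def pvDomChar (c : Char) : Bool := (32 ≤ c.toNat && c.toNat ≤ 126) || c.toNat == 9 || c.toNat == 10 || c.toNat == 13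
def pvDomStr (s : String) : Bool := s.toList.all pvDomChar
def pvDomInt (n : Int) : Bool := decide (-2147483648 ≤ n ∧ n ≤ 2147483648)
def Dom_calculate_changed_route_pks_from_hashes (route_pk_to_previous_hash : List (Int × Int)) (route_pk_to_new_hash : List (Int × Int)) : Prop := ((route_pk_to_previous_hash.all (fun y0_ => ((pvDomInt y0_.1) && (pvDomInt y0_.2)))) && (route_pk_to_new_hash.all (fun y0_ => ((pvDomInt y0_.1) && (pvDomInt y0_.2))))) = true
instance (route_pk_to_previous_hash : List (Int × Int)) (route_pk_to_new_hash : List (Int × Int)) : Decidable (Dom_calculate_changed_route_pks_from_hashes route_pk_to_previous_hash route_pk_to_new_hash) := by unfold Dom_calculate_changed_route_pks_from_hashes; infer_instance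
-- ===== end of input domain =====

-- B replaces A's per-key lookup-and-compare loop over the key union by intersecting the two dicts' (pk, hash) item sets and subtracting the unchanged pks from the key union; objective: alternative (same cost).


-- ===== PORT A =====
def calculate_changed_route_pks_from_hashes (route_pk_to_previous_hash : List (Int × Int)) (route_pk_to_new_hash : List (Int × Int)) : List Int :=
  let all_route_pks : PySem.Set Int :=
    PySem.Set.union (PySem.Set.ofList (route_pk_to_new_hash.map Prod.fst))
      (route_pk_to_previous_hash.map Prod.fst)
  all_route_pks.foldl
    (fun changed_route_pks route_pk =>
      match List.lookup route_pk route_pk_to_previous_hash,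
            List.lookup route_pk route_pk_to_new_hash with
      | some previous_hash, some new_hash =>
          if previous_hash == new_hash then changed_route_pks
          else PySem.Set.add changed_route_pks route_pk
      | _, _ => PySem.Set.add changed_route_pks route_pk)
    PySem.Set.empty

-- ===== PORT B =====
-- dict.items() for the assoc-list dict representation (lookup = first match):
-- the pairs whose key is not shadowed by an earlier pair.
def pvItems : List (Int × Int) → List (Int × Int)
  | [] => []
  | p :: rest => p :: (pvItems rest).filter (fun q => !(q.1 == p.1))

-- Note: Source B's 'item[1] is not None' filters are vacuous on this dict[int, int] domain
-- (every stored hash is an Int, never None), so the item sets are the items themselves.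
def calculate_changed_route_pks_from_hashes_alt (route_pk_to_previous_hash : List (Int × Int)) (route_pk_to_new_hash : List (Int × Int)) : List Int :=
  let previous_items : PySem.Set (Int × Int) := PySem.Set.ofList (pvItems route_pk_to_previous_hash)
  let new_items : PySem.Set (Int × Int) := PySem.Set.ofList (pvItems route_pk_to_new_hash)
  let unchanged_route_pks : PySem.Set Int :=
    PySem.Set.ofList ((PySem.Set.inter new_items previous_items).map Prod.fst)
  let all_route_pks : PySem.Set Int :=
    PySem.Set.union (PySem.Set.ofList (route_pk_to_new_hash.map Prod.fst))
      (route_pk_to_previous_hash.map Prod.fst)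
  PySem.Set.diff all_route_pks unchanged_route_pks

-- ===== PRECONDITION & SPEC =====
def Spec_calculate_changed_route_pks_from_hashes (route_pk_to_previous_hash : List (Int × Int)) (route_pk_to_new_hash : List (Int × Int)) (out : List Int) : Prop := out = calculate_changed_route_pks_from_hashes_alt route_pk_to_previous_hash route_pk_to_new_hash
instance (route_pk_to_previous_hash : List (Int × Int)) (route_pk_to_new_hash : List (Int × Int)) (out : List Int) : Decidable (Spec_calculate_changed_route_pks_from_hashes route_pk_to_previous_hash route_pk_to_new_hash out) := by unfold Spec_calculate_changed_route_pks_from_hashes; infer_instance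

-- ===== CLAIM =====
def Claim_equal_calculate_changed_route_pks_from_hashes : Prop := ∀ (route_pk_to_previous_hash : List (Int × Int)) (route_pk_to_new_hash : List (Int × Int)), Dom_calculate_changed_route_pks_from_hashes route_pk_to_previous_hash route_pk_to_new_hash → Spec_calculate_changed_route_pks_from_hashes route_pk_to_previous_hash route_pk_to_new_hash (calculate_changed_route_pks_from_hashes route_pk_to_previous_hash route_pk_to_new_hash)

-- ===== LEMMAS AND PROOFS =====

-- the "unchanged" condition: both dicts hold a hash for pk and they agree
def pvUnch (prev new : List (Int × Int)) (pk : Int) : Bool :=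
  match List.lookup pk prev, List.lookup pk new with
  | some p, some n => p == n
  | _, _ => false

theorem mem_pvItems (l : List (Int × Int)) (pk h : Int) :
    (pk, h) ∈ pvItems l ↔ List.lookup pk l = some h := by
  induction l with
  | nil => simp [pvItems, List.lookup]
  | cons p rest ih =>
      obtain ⟨a, b⟩ := p
      by_cases hk : pk = a
      · subst hk
        simp [pvItems, List.lookup, List.mem_filter, eq_comm]
      · have hb : (pk == a) = false := beq_false_of_ne hk
        simp [pvItems, List.lookup, hb, List.mem_filter, ih, hk]

theorem foldlA_eq_filter (prev new : List (Int × Int)) :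
    ∀ (l acc : List Int), l.Nodup → (∀ x ∈ l, x ∉ acc) →
    l.foldl
      (fun changed pk =>
        match List.lookup pk prev, List.lookup pk new with
        | some p, some n => if p == n then changed else PySem.Set.add changed pk
        | _, _ => PySem.Set.add changed pk) acc
    = acc ++ l.filter (fun pk => !pvUnch prev new pk) := by
  intro l
  induction l with
  | nil => intro acc _ _; simp
  | cons x xs ih =>
      intro acc hnd hacc
      have hx : x ∉ acc := hacc x (by simp)
      have hstep :
          (match List.lookup x prev, List.lookup x new with
            | some p, some n => if p == n then acc else PySem.Set.add acc x
            | _, _ => PySem.Set.add acc x)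
          = if pvUnch prev new x then acc else acc ++ [x] := by
        have hadd : PySem.Set.add acc x = acc ++ [x] := by
          simp [PySem.Set.add, PySem.Set.contains, List.contains_eq_mem, hx]
        unfold pvUnch
        cases List.lookup x prev <;> cases List.lookup x new <;> simp [hadd]
      rw [List.foldl_cons, hstep]
      rcases List.nodup_cons.mp hnd with ⟨hxxs, hndxs⟩
      by_cases hu : pvUnch prev new x
      · rw [if_pos hu]
        rw [ih acc hndxs (fun y hy => hacc y (by simp [hy]))]
        simp [hu]
      · rw [if_neg hu]
        rw [ih (acc ++ [x]) hndxs (fun y hy => by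
          simp only [List.mem_append, List.mem_singleton]
          rintro (h | rfl)
          · exact hacc y (by simp [hy]) h
          · exact hxxs hy)]
        simp [hu]

theorem contains_unchanged (prev new : List (Int × Int)) (pk : Int) :
    PySem.Set.contains
      (PySem.Set.ofList ((PySem.Set.inter (PySem.Set.ofList (pvItems new))
          (PySem.Set.ofList (pvItems prev))).map Prod.fst)) pk
    = pvUnch prev new pk := by
  have hmem : ∀ (xs : List Int) (x : Int),
      PySem.Set.contains (PySem.Set.ofList xs) x = decide (x ∈ xs) := by
    intro xs x
    simp [PySem.Set.contains, List.contains_eq_mem, PySem.Set.mem_ofList]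
  rw [hmem]
  have hiff : pk ∈ (PySem.Set.inter (PySem.Set.ofList (pvItems new))
      (PySem.Set.ofList (pvItems prev))).map Prod.fst
      ↔ ∃ h, List.lookup pk new = some h ∧ List.lookup pk prev = some h := by
    simp only [List.mem_map]
    constructor
    · rintro ⟨⟨k, h⟩, hin, rfl⟩
      rw [PySem.Set.mem_inter, PySem.Set.mem_ofList, PySem.Set.mem_ofList,
        mem_pvItems, mem_pvItems] at hin
      exact ⟨h, hin.1, hin.2⟩
    · rintro ⟨h, hn, hp⟩
      refine ⟨(pk, h), ?_, rfl⟩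
      rw [PySem.Set.mem_inter, PySem.Set.mem_ofList, PySem.Set.mem_ofList,
        mem_pvItems, mem_pvItems]
      exact ⟨hn, hp⟩
  by_cases hu : pvUnch prev new pk = true
  · rw [hu]
    unfold pvUnch at hu
    rcases hp : List.lookup pk prev with _ | p <;> rcases hn : List.lookup pk new with _ | n <;>
      rw [hp, hn] at hu <;> simp at hu
    simp only [decide_eq_true_iff]
    exact hiff.mpr ⟨n, hn, by rw [hp, hu]⟩
  · rw [eq_false_of_ne_true hu]
    simp only [decide_eq_false_iff_not]
    intro hinm
    rcases hiff.mp hinm with ⟨h, hn, hp⟩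
    unfold pvUnch at hu
    rw [hp, hn] at hu
    simp at hu

-- ===== VERDICT =====
theorem calculate_changed_route_pks_from_hashes_spec : Claim_equal_calculate_changed_route_pks_from_hashes := by
  intro prev new _
  unfold Spec_calculate_changed_route_pks_from_hashes
  simp only [calculate_changed_route_pks_from_hashes, calculate_changed_route_pks_from_hashes_alt]
  have hnd : (PySem.Set.union (PySem.Set.ofList (new.map Prod.fst))
      ((prev.map Prod.fst) : List Int)).Nodup :=
    PySem.Set.nodup_union _ _ (PySem.Set.nodup_ofList _)
  rw [foldlA_eq_filter prev new _ PySem.Set.empty hnd (by intro x _ h; simp [PySem.Set.empty] at h)]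
  simp only [PySem.Set.diff, PySem.Set.empty, List.nil_append]
  refine (List.filter_congr ?_).symm
  intro pk _
  rw [contains_unchanged prev new pk]
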